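-- pv_equiv track=rewrite | github.com/Furrj/AdventOfCode | year1/day11/validation.py | has_doubles
-- ===== SOURCE A (Python) =====
-- def has_doubles(input: str) -> bool:
--     split = [x for x in input]
--     first_match = ""
--     count = 0
--
--     for i in range(len(input) - 1):
--         if input[i] == input[i + 1]:
--             count += 1
--             first_match += input[i]
--             break
--
--     for i in range(len(input) - 1):
--         if input[i] == input[i + 1] and input[i] not in first_match:
--             count += 1
--             break
--
--     if count >= 2:
--         return True
--     else:
--         return False
-- ===== SOURCE B (Python) =====
-- def has_doubles(input: str) -> bool:
--     doubles = {a for a, b in zip(input, input[1:]) if a == b}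
--     return len(doubles) >= 2
-- ===== Notes on version B (the rewrite author's own statement) =====
-- stated objective: simpler
-- what changed: Replaces A's two separate break-on-first-hit scans with sentinel string and count bookkeeping by one pass that collects the set of characters forming adjacent doubles and tests its cardinality.
import Mathlib
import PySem

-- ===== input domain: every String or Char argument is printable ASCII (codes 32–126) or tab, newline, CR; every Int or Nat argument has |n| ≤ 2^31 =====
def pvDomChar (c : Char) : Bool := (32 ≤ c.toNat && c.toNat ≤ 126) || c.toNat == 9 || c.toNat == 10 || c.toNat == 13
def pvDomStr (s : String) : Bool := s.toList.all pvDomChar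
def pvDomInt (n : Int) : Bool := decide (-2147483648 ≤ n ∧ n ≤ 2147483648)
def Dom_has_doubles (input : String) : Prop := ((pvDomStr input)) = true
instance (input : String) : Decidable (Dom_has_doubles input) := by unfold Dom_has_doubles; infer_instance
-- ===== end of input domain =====

-- B replaces A's two break-on-first-hit scans (count + first-match sentinel) by one pass
-- collecting the set of double-forming characters and a cardinality test (objective: simpler).


-- ===== PORT A =====
-- first loop: scan adjacent pairs, on the first equal pair record the char (first_match) and break
def pvLoopA1 : List Char → List Char
  | a :: b :: rest => if a == b then [a] else pvLoopA1 (b :: rest)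
  | _ => []

-- second loop: scan adjacent pairs, break (true) on an equal pair whose char is not in first_match
def pvLoopA2 (fm : List Char) : List Char → Bool
  | a :: b :: rest => if a == b && !(fm.contains a) then true else pvLoopA2 fm (b :: rest)
  | _ => false

def has_doubles (input : String) : Bool :=
  let _split := input.toList       -- A's unused 'split'
  let fm := pvLoopA1 input.toList
  let count : Int := (if fm.isEmpty then 0 else 1) + (if pvLoopA2 fm input.toList then 1 else 0)
  if count ≥ 2 then true else false

-- ===== PORT B =====
-- one pass over zipped adjacent pairs, maintaining the set of double-forming chars
def pvDoubles (acc : PySem.Set Char) : List Char → PySem.Set Char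
  | a :: b :: rest => pvDoubles (if a == b then PySem.Set.add acc a else acc) (b :: rest)
  | _ => acc

def has_doubles_alt (input : String) : Bool :=
  decide (2 ≤ PySem.Set.len (pvDoubles PySem.Set.empty input.toList))

-- ===== PRECONDITION & SPEC =====
def Spec_has_doubles (input : String) (out : Bool) : Prop := out = has_doubles_alt input
instance (input : String) (out : Bool) : Decidable (Spec_has_doubles input out) := by unfold Spec_has_doubles; infer_instance

-- ===== CLAIM (what is proved, stated in full; the proofs are below) =====
def Claim_equal_has_doubles : Prop := ∀ (input : String), Dom_has_doubles input → Spec_has_doubles input (has_doubles input)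

-- ===== LEMMAS AND PROOFS =====

-- the multiset of characters that form an adjacent double, in order
def pvDbl : List Char → List Char
  | a :: b :: rest => if a == b then a :: pvDbl (b :: rest) else pvDbl (b :: rest)
  | _ => []

theorem pvLoopA1_eq (cs : List Char) : pvLoopA1 cs = (pvDbl cs).take 1 := by
  induction cs with
  | nil => rfl
  | cons a t ih =>
    cases t with
    | nil => rfl
    | cons b rest =>
      simp only [pvLoopA1, pvDbl]
      split <;> simp_all

theorem pvLoopA2_eq (fm : List Char) (cs : List Char) :
    pvLoopA2 fm cs = (pvDbl cs).any (fun c => !(fm.contains c)) := by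
  induction cs with
  | nil => rfl
  | cons a t ih =>
    cases t with
    | nil => rfl
    | cons b rest =>
      simp only [pvLoopA2, pvDbl]
      by_cases hab : a == b
      · by_cases hfm : fm.contains a <;> simp_all
      · simp_all

theorem pvDoubles_eq (acc : PySem.Set Char) (cs : List Char) :
    pvDoubles acc cs = (pvDbl cs).foldl PySem.Set.add acc := by
  induction cs generalizing acc with
  | nil => rfl
  | cons a t ih =>
    cases t with
    | nil => rfl
    | cons b rest =>
      simp only [pvDoubles, pvDbl]
      split <;> simp_all

-- a nodup list containing h has length ≥ 2 iff it contains something other than h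
theorem pv_two_le_len (l : List Char) (h : Char) (hnd : l.Nodup) (hm : h ∈ l) :
    2 ≤ l.length ↔ ∃ x ∈ l, x ≠ h := by
  constructor
  · intro hlen
    by_contra hc
    push Not at hc
    have hcount : l.count h = l.length := List.count_eq_length.mpr (by intro b hb; exact ((hc b hb)).symm ▸ rfl)
    have := List.nodup_iff_count_le_one.mp hnd h
    omega
  · rintro ⟨x, hx, hxh⟩
    cases l with
    | nil => simp at hm
    | cons a t =>
      cases t with
      | nil =>
        simp only [List.mem_singleton] at hm hx
        exact absurd (hx.trans hm.symm) hxh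
      | cons b r => simp [List.length]

theorem pv_core (d : List Char) :
    (if ((if (d.take 1).isEmpty then (0:Int) else 1) +
         (if d.any (fun c => !((d.take 1).contains c)) then 1 else 0)) ≥ 2 then true else false)
      = decide (2 ≤ PySem.Set.len (d.foldl PySem.Set.add PySem.Set.empty)) := by
  cases d with
  | nil => simp [PySem.Set.len, PySem.Set.empty]
  | cons h t =>
    have hof : (h :: t).foldl PySem.Set.add PySem.Set.empty = PySem.Set.ofList (h :: t) :=
      (PySem.Set.ofList_eq_foldl (h :: t)).symm
    rw [hof]
    have hnd := PySem.Set.nodup_ofList (xs := h :: t)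
    have hm : h ∈ PySem.Set.ofList (h :: t) := by
      rw [PySem.Set.mem_ofList]; exact List.mem_cons_self
    have hlen := pv_two_le_len _ h hnd hm
    have hex : (∃ x ∈ PySem.Set.ofList (h :: t), x ≠ h) ↔ (∃ x ∈ t, x ≠ h) := by
      simp only [PySem.Set.mem_ofList, List.mem_cons]
      constructor
      · rintro ⟨x, hx | hx, hxh⟩
        · exact absurd hx hxh
        · exact ⟨x, hx, hxh⟩
      · rintro ⟨x, hx, hxh⟩; exact ⟨x, Or.inr hx, hxh⟩
    have hany : ((h :: t).any (fun c => !(((h :: t).take 1).contains c)) = true) ↔ (∃ x ∈ t, x ≠ h) := by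
      simp [List.any_eq_true]
    by_cases hca : (h :: t).any (fun c => !(((h :: t).take 1).contains c))
    · have h2 : 2 ≤ (PySem.Set.ofList (h :: t)).length := hlen.mpr (hex.mpr (hany.mp hca))
      have he : ∃ x ∈ t, x ≠ h := hany.mp hca
      simp [PySem.Set.len, h2, he]
    · have h2 : ¬ 2 ≤ (PySem.Set.ofList (h :: t)).length := by
        intro hh; exact hca (hany.mpr (hex.mp (hlen.mp hh)))
      have he : ¬ ∃ x ∈ t, x ≠ h := fun e => hca (hany.mpr e)
      simp [PySem.Set.len, h2, he]

-- ===== VERDICT (by name: the statement is the Claim_ definition above) =====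
theorem has_doubles_spec : Claim_equal_has_doubles := by
  intro input _
  unfold Spec_has_doubles has_doubles has_doubles_alt
  simp only [pvLoopA1_eq, pvLoopA2_eq, pvDoubles_eq]
  exact pv_core (pvDbl input.toList)
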